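-- pv_equiv track=rewrite | github.com/XiaoLingYYY/homework-Espresso-Logic-Minimizer | espresso_main/espresso_core.py | irredundant
-- ===== SOURCE A (Python) =====
-- from itertools import product
--
-- def cube_contains(c1: str, c2: str) -> bool:
--     """
--     检查 c1 是否为 c2 的超集
--         :rtype: bool
--         :return: 如果 c1 包含 c2，返回 True，否则返回 False。
--     """
--     for i in range(0, len(c1), 2):
--         p1 = c1[i:i + 2];
--         p2 = c2[i:i + 2];
--         # c1 的某一位是确定值('01'或'10')，而 c2 的对应位不是相同的值，则 c1 不包含 c2。
--         if (p1 == '01' and p2 != '01') or \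
--                 (p1 == '10' and p2 != '10'):
--             return False
--     return True
--
-- def get_minterms(cube: str) -> set[str]:
--     """
--     生成一个立方体所包含的所有 minterms。
--     最小项是立方体最具体的表现形式，不包含任何 '11'
--
--     :param cube:一个立方体字符串。
--     :return:  一个包含该立方体所有最小项字符串的集合。
--     """
--
--     num_vars = len(cube) // 2
--     # 'parts' 列表的每个元素都是一个列表，代表一个变量位所有可能的最小项形式。
--     parts = []
--     for i in range(num_vars):
--         part = cube[i * 2:i * 2 + 2]
--         if part == '01':
--             parts.append(['01'])
--         elif part == '10':
--             parts.append(['10'])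
--         else:  # "11" don't care, 意味着两种可能性都存在
--             parts.append(['01', '10'])
--
--     # 使用 itertools.product 计算所有部分的笛卡尔积，生成所有最小项。
--     minterms_tuples = product(*parts)
--     minterms = ["".join(p) for p in minterms_tuples]
--     return set(minterms)
--
-- def is_covered(minterm, cover):
--     """检查一个最小项是否被一个cover所包含。"""
--     for cube in cover:
--         if cube_contains(cube, minterm):
--             return True
--     return False
--
-- def irredundant(cover):
--     # IRREDUNDANT: 移除覆盖中的冗余项，得到一个无冗余的覆盖。
--     final_cover = list(cover)
--     for i in range(len(final_cover) - 1, -1, -1):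
--         cube_to_check = final_cover[i]
--         other_cubes = final_cover[:i] + final_cover[i + 1:]
--         if not other_cubes: continue
--         # 如果一个立方体的所有最小项都被其他立方体覆盖，则它是冗余的
--         if all(is_covered(m, other_cubes) for m in get_minterms(cube_to_check)):
--             final_cover.pop(i)
--     return final_cover
-- ===== SOURCE B (Python) =====
-- def _constraints(d):
--     # the determined full 2-char blocks of a cube, as (block index, value)
--     # pairs with strictly increasing indices
--     cs = []
--     for j in range(len(d) // 2):
--         p = d[2 * j:2 * j + 2]
--         if p == '01' or p == '10':
--             cs.append((j, p))
--     return cs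
--
--
-- def _covers_all(cube, others):
--     # Recursive cofactor (Shannon-expansion) tautology check: does 'others'
--     # cover every minterm of 'cube'?  Branches block by block on cube's free
--     # blocks, pruning inconsistent candidates and consuming their constraint
--     # lists in step, instead of enumerating all minterms of 'cube'.
--     k = len(cube) // 2
--     cands = []
--     for d in others:
--         c = _constraints(d)
--         if not c:
--             return True       # an unconstrained cube covers everything
--         if all(j < k for j, _ in c):
--             cands.append(c)
--
--     def rec(fuel, j, cands):
--         if any(not c for c in cands):
--             return True      # a candidate with no constraints left covers all
--         if not cands:
--             return False
--         if fuel == 0: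
--             return False     # unreachable: here j = k forces cands == []
--         b = cube[2 * j:2 * j + 2]
--         choices = [b] if b in ('01', '10') else ['01', '10']
--         for v in choices:
--             nxt = [c[1:] if c[0][0] == j else c
--                    for c in cands if c[0][0] != j or c[0][1] == v]
--             if not rec(fuel - 1, j + 1, nxt):
--                 return False
--         return True
--
--     return rec(k, 0, cands)
--
--
-- def irredundant(cover):
--     final_cover = list(cover)
--     for i in range(len(final_cover) - 1, -1, -1):
--         others = final_cover[:i] + final_cover[i + 1:]
--         if others and _covers_all(final_cover[i], others):
--             final_cover.pop(i)
--     return final_cover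
-- ===== Notes on version B (the rewrite author's own statement) =====
-- stated objective: alternative
-- what changed: A tests each cube for redundancy by enumerating every minterm of the cube and scanning the remaining cover for each one; B runs a recursive cofactor (Shannon-expansion) coverage check that branches block by block, pruning inconsistent candidate cubes and consuming their sorted constraint lists, so minterms are never materialised (with an early exit when some other cube has no constraints at all).
import Mathlib
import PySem

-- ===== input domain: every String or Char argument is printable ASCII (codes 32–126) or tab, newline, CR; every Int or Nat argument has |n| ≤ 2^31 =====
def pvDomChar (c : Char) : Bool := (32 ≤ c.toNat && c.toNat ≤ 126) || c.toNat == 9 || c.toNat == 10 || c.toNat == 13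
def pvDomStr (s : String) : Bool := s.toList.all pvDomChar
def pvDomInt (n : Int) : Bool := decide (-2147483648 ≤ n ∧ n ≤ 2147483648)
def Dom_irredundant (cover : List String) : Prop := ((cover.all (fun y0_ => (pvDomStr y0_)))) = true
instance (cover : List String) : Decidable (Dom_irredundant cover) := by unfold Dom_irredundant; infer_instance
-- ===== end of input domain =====

-- B replaces A's per-cube enumeration of all minterms by a recursive cofactor
-- (Shannon-expansion) coverage check that prunes candidate cubes block by block;
-- objective: alternative (a genuinely different algorithm of similar cost).

-- ===== PORT A =====
-- helpers are transliterated over List Char (PySem string ops are defined on List Char; exact)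

-- cube_contains(c1, c2)
def cubeContains (c1 c2 : List Char) : Bool :=
  (PySem.List.pyRange 0 c1.length 2).all (fun i =>
    let p1 := PySem.List.slice c1 (some i) (some (i + 2))
    let p2 := PySem.List.slice c2 (some i) (some (i + 2))
    !((p1 == ['0', '1'] && !(p2 == ['0', '1'])) ||
      (p1 == ['1', '0'] && !(p2 == ['1', '0']))))

-- itertools.product(*parts) (tuples in Python's order)
def prodAll : List (List (List Char)) → List (List (List Char))
  | [] => [[]]
  | p :: ps => p.flatMap (fun x => (prodAll ps).map (fun rest => x :: rest))

-- get_minterms(cube)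
def getMinterms (cube : List Char) : PySem.Set (List Char) :=
  let numVars : Nat := cube.length / 2
  let parts := (PySem.List.pyRange 0 numVars 1).map (fun i =>
    let part := PySem.List.slice cube (some (i * 2)) (some (i * 2 + 2))
    if part = ['0', '1'] then [['0', '1']]
    else if part = ['1', '0'] then [['1', '0']]
    else [['0', '1'], ['1', '0']])
  let mintermsTuples := prodAll parts
  let minterms := mintermsTuples.map (fun p => p.flatten)  -- "".join(p)
  PySem.Set.ofList minterms

-- is_covered(minterm, cover)
def isCovered (minterm : List Char) (cover : List String) : Bool :=
  cover.any (fun cube => cubeContains cube.toList minterm)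

-- irredundant(cover)
def irredundant (cover : List String) : List String :=
  (PySem.List.pyRange ((cover.length : Int) - 1) (-1) (-1)).foldl
    (fun finalCover i =>
      match PySem.List.pyGet? finalCover i with
      | none => finalCover  -- unreachable: i is always a valid index here
      | some cubeToCheck =>
        let otherCubes := PySem.List.slice finalCover none (some i) ++
                          PySem.List.slice finalCover (some (i + 1)) none
        if otherCubes.isEmpty then finalCover
        else if (getMinterms cubeToCheck.toList).all
                  (fun m => isCovered m otherCubes) then
          match PySem.List.pop? finalCover i with
          | some r => r.2
          | none => finalCover  -- unreachable
        else finalCover)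
    cover

-- ===== PORT B =====

-- _constraints(d)
def constraintsOf (d : List Char) : List (Int × List Char) :=
  (PySem.List.pyRange 0 ((d.length / 2 : Nat) : Int) 1).foldl
    (fun cs j =>
      let p := PySem.List.slice d (some (2 * j)) (some (2 * j + 2))
      if p == ['0', '1'] || p == ['1', '0'] then cs ++ [(j, p)] else cs)
    []

-- rec(fuel, j, cands) inside _covers_all (fuel = k - j bounds the recursion depth)
def recCov (cube : List Char) : Nat → Int → List (List (Int × List Char)) → Bool
  | fuel, j, cands =>
    if cands.any (fun c => c.isEmpty) then true
    else if cands.isEmpty then false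
    else
      match fuel with
      | 0 => false  -- unreachable: here j = k forces cands == []
      | fuel' + 1 =>
        let b := PySem.List.slice cube (some (2 * j)) (some (2 * j + 2))
        let choices := if b == ['0', '1'] || b == ['1', '0'] then [b]
                       else [['0', '1'], ['1', '0']]
        choices.all (fun v =>
          recCov cube fuel' (j + 1)
            ((cands.filter (fun c =>
                match c.head? with
                | some iw => !(iw.1 == j) || iw.2 == v
                | none => true)).map (fun c =>
                match c.head? with
                | some iw => if iw.1 == j then c.tail else c
                | none => c)))

-- the candidate-collecting loop of _covers_all (early exit on an unconstrained cube)
def coversAllGo (cube : List Char) (k : Nat) :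
    List String → List (List (Int × List Char)) → Bool
  | [], cands => recCov cube k 0 cands
  | d :: rest, cands =>
    let c := constraintsOf d.toList
    if c.isEmpty then true
    else if c.all (fun p => p.1 < (k : Int)) then coversAllGo cube k rest (cands ++ [c])
    else coversAllGo cube k rest cands

-- _covers_all(cube, others)
def coversAll (cube : List Char) (others : List String) : Bool :=
  coversAllGo cube (cube.length / 2) others []

-- irredundant (B)
def irredundant_alt (cover : List String) : List String :=
  (PySem.List.pyRange ((cover.length : Int) - 1) (-1) (-1)).foldl
    (fun finalCover i =>
      match PySem.List.pyGet? finalCover i with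
      | none => finalCover  -- unreachable: i is always a valid index here
      | some cube =>
        let others := PySem.List.slice finalCover none (some i) ++
                      PySem.List.slice finalCover (some (i + 1)) none
        if !others.isEmpty && coversAll cube.toList others then
          match PySem.List.pop? finalCover i with
          | some r => r.2
          | none => finalCover  -- unreachable
        else finalCover)
    cover

-- ===== PRECONDITION & SPEC =====
def Spec_irredundant (cover : List String) (out : List String) : Prop := out = irredundant_alt cover
instance (cover : List String) (out : List String) : Decidable (Spec_irredundant cover out) := by unfold Spec_irredundant; infer_instance

-- ===== CLAIM (what is proved, stated in full; the proofs are below) =====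
def Claim_equal_irredundant : Prop := ∀ (cover : List String), Dom_irredundant cover → Spec_irredundant cover (irredundant cover)

-- ===== LEMMAS AND PROOFS =====

-- proof-side helpers

def blockAt (c : List Char) (t : Nat) : List Char := List.take 2 (List.drop (2 * t) c)

def partAt (c : List Char) (t : Nat) : List (List Char) :=
  if blockAt c t = ['0', '1'] then [['0', '1']]
  else if blockAt c t = ['1', '0'] then [['1', '0']]
  else [['0', '1'], ['1', '0']]

def partsOf (c : List Char) : List (List (List Char)) :=
  (List.range (c.length / 2)).map (partAt c)

def okAt (j : Int) (mb : List (List Char)) (cstr : List (Int × List Char)) : Bool :=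
  cstr.all (fun p => PySem.List.pyGet? mb (p.1 - j) == some p.2)

def candsOf (cube : List Char) (others : List String) : List (List (Int × List Char)) :=
  (others.map (fun d => constraintsOf d.toList)).filter
    (fun c => c.all (fun p => p.1 < ((cube.length / 2 : Nat) : Int)))

lemma getMinterms_eq (c : List Char) :
    getMinterms c = PySem.Set.ofList ((prodAll (partsOf c)).map List.flatten) := by
  have hp : (PySem.List.pyRange 0 ((c.length / 2 : Nat) : Int) 1).map (fun i =>
      let part := PySem.List.slice c (some (i * 2)) (some (i * 2 + 2))
      if part = ['0', '1'] then [['0', '1']]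
      else if part = ['1', '0'] then [['1', '0']]
      else [['0', '1'], ['1', '0']]) = partsOf c := by
    rw [PySem.List.pyRange_one]
    simp only [sub_zero, Int.toNat_natCast, List.map_map, partsOf]
    apply List.map_congr_left
    intro t ht
    have h1 : ((0 : Int) + (t : Int)) * 2 = ((2 * t : Nat) : Int) := by push_cast; ring
    have h2 : ((2 * t : Nat) : Int) + 2 = ((2 * t + 2 : Nat) : Int) := by push_cast; ring
    simp only [Function.comp, h1, h2, PySem.List.slice_natCast, partAt, blockAt,
      Nat.add_sub_cancel_left]
    rfl
  simp only [getMinterms]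
  rw [hp]

lemma ofList_all {α : Type} [BEq α] [LawfulBEq α] (xs : List α) (p : α → Bool) :
    (PySem.Set.ofList xs).all p = xs.all p := by
  rw [Bool.eq_iff_iff, List.all_eq_true, List.all_eq_true]
  constructor
  · intro h x hx; exact h x ((PySem.Set.mem_ofList xs x).mpr hx)
  · intro h x hx; exact h x ((PySem.Set.mem_ofList xs x).mp hx)

lemma constraintsOf_eq (d : List Char) :
    constraintsOf d =
      ((List.range (d.length / 2)).filter
          (fun t => blockAt d t == ['0', '1'] || blockAt d t == ['1', '0'])).map
        (fun (t : Nat) => ((t : Int), blockAt d t)) := by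
  have slice2 : ∀ (t : Nat), PySem.List.slice d (some (2 * (t : Int))) (some (2 * (t : Int) + 2)) = blockAt d t := by
    intro t
    have h1 : (2 * (t : Int)) = ((2 * t : Nat) : Int) := by push_cast; ring
    have h2 : ((2 * t : Nat) : Int) + 2 = ((2 * t + 2 : Nat) : Int) := by push_cast; ring
    rw [h1, h2, PySem.List.slice_natCast]
    unfold blockAt
    congr 1
    omega
  unfold constraintsOf
  rw [PySem.List.pyRange_one]
  simp only [sub_zero, Int.toNat_natCast, zero_add, List.foldl_map]
  have hb : (fun (cs : List (Int × List Char)) (t : Nat) =>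
      (fun cs (j : Int) =>
        let p := PySem.List.slice d (some (2 * j)) (some (2 * j + 2))
        if p == ['0', '1'] || p == ['1', '0'] then cs ++ [(j, p)] else cs) cs (t : Int)) =
      (fun cs t => if (fun (t : Nat) => blockAt d t == ['0', '1'] || blockAt d t == ['1', '0']) t = true
        then cs ++ [(fun (t : Nat) => ((t : Int), blockAt d t)) t] else cs) := by
    funext cs t
    simp only [slice2]
  rw [hb, PySem.List.foldl_append_if]
  simp

lemma mem_prodAll (ps : List (List (List Char))) (mb : List (List Char)) :
    mb ∈ prodAll ps ↔ List.Forall₂ (fun x p => x ∈ p) mb ps := by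
  induction ps generalizing mb with
  | nil => simp [prodAll, List.forall₂_nil_right_iff]
  | cons p ps ih =>
    simp only [prodAll, List.mem_flatMap, List.mem_map]
    constructor
    · rintro ⟨x, hx, rest, hrest, rfl⟩
      exact List.Forall₂.cons hx ((ih rest).mp hrest)
    · intro h
      cases h with
      | cons hx hrest => exact ⟨_, hx, _, (ih _).mpr hrest, rfl⟩

lemma prodAll_ne_nil (ps : List (List (List Char))) (h : ∀ p ∈ ps, p ≠ []) :
    prodAll ps ≠ [] := by
  induction ps with
  | nil => simp [prodAll]
  | cons p ps ih =>
    simp only [prodAll, ne_eq, List.flatMap_eq_nil_iff, not_forall]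
    rcases List.exists_mem_of_ne_nil p (h p (by simp)) with ⟨x, hx⟩
    refine ⟨x, hx, ?_⟩
    simp only [List.map_eq_nil_iff]
    exact ih (fun q hq => h q (by simp [hq]))

lemma mem_partAt {c : List Char} {t : Nat} {b : List Char} (hb : b ∈ partAt c t) :
    b = ['0', '1'] ∨ b = ['1', '0'] := by
  unfold partAt at hb
  split_ifs at hb <;> simp_all

lemma flatten_drop (mb : List (List Char)) (h : ∀ b ∈ mb, b.length = 2) (t : Nat) :
    mb.flatten.drop (2 * t) = (mb.drop t).flatten := by
  induction mb generalizing t with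
  | nil => simp
  | cons b r ih =>
    cases t with
    | zero => simp
    | succ s =>
      have hb : b.length = 2 := h b (by simp)
      have h2 : 2 * (s + 1) = b.length + 2 * s := by omega
      simp only [List.flatten_cons, h2, List.drop_append, List.drop_succ_cons]
      rw [List.drop_eq_nil_of_le (by omega), List.nil_append,
        show b.length + 2 * s - b.length = 2 * s from by omega]
      exact ih (fun x hx => h x (by simp [hx])) s

lemma flatten_take2 (mb : List (List Char)) (h : ∀ b ∈ mb, b.length = 2) (t : Nat) :
    List.take 2 (mb.flatten.drop (2 * t)) = mb.getD t [] := by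
  rw [flatten_drop mb h t]
  by_cases ht : t < mb.length
  · rw [List.drop_eq_getElem_cons ht, List.flatten_cons, List.getD_eq_getElem mb [] ht]
    have h2 : mb[t].length = 2 := h _ (List.getElem_mem ht)
    rw [← h2, List.take_left]
  · rw [List.drop_eq_nil_of_le (by omega), List.getD_eq_default mb [] (by omega)]
    simp

lemma slice_two (d : List Char) (t : Nat) :
    PySem.List.slice d (some ((2 * t : Nat) : Int)) (some (((2 * t : Nat) : Int) + 2)) = blockAt d t := by
  rw [show (((2 * t : Nat) : Int) + 2) = ((2 * t + 2 : Nat) : Int) from by push_cast; ring,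
    PySem.List.slice_natCast]
  unfold blockAt
  congr 1
  omega

lemma blockAt_det_lt {d : List Char} {t : Nat}
    (hb : blockAt d t = ['0', '1'] ∨ blockAt d t = ['1', '0']) : t < d.length / 2 := by
  have hlen : (blockAt d t).length = 2 := by rcases hb with h | h <;> rw [h] <;> rfl
  unfold blockAt at hlen
  simp only [List.length_take, List.length_drop] at hlen
  omega

lemma cubeContains_flatten (d : List Char) (mb : List (List Char))
    (h2 : ∀ b ∈ mb, b.length = 2) :
    cubeContains d mb.flatten =
      (constraintsOf d).all (fun p => PySem.List.pyGet? mb p.1 == some p.2) := by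
  unfold cubeContains
  rw [constraintsOf_eq, Bool.eq_iff_iff, List.all_eq_true, List.all_eq_true]
  have hget : ∀ t : Nat, PySem.List.pyGet? mb (t : Int) = mb[t]? := by
    intro t
    rw [PySem.List.pyGet?_of_nonneg mb (by positivity), Int.toNat_natCast]
  have hslf : ∀ t : Nat,
      PySem.List.slice mb.flatten (some ((2 * t : Nat) : Int)) (some (((2 * t : Nat) : Int) + 2)) =
        mb.getD t [] := by
    intro t
    rw [show (((2 * t : Nat) : Int) + 2) = ((2 * t + 2 : Nat) : Int) from by push_cast; ring,
      PySem.List.slice_natCast, show 2 * t + 2 - 2 * t = 2 from by omega]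
    exact flatten_take2 mb h2 t
  constructor
  · intro hall p hp
    rcases List.mem_map.mp hp with ⟨t, htf, rfl⟩
    rcases List.mem_filter.mp htf with ⟨htr, hPt⟩
    have htlen : t < d.length / 2 := List.mem_range.mp htr
    have hmem : ((2 * t : Nat) : Int) ∈ PySem.List.pyRange 0 (d.length : Int) 2 := by
      rw [PySem.List.mem_pyRange_iff_of_pos (by norm_num)]
      refine ⟨by positivity, by exact_mod_cast (show 2 * t < d.length from by omega), ⟨t, by push_cast; ring⟩⟩
    have hcond := hall _ hmem
    simp only [slice_two, hslf, Bool.not_eq_eq_eq_not, Bool.not_true, Bool.or_eq_false_iff,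
      Bool.and_eq_false_iff] at hcond
    simp only [beq_iff_eq, Bool.or_eq_true] at hPt
    simp only [hget, beq_iff_eq]
    obtain ⟨hc1, hc2⟩ := hcond
    by_cases hmt : t < mb.length
    · rw [List.getD_eq_getElem mb [] hmt] at hc1 hc2
      rw [List.getElem?_eq_getElem hmt]
      rcases hPt with hb | hb <;> rw [hb] at hc1 hc2 ⊢
      · rcases hc1 with h' | h'
        · simp at h'
        · simp at h'
          rw [h']
      · rcases hc2 with h' | h'
        · simp at h'
        · simp at h'
          rw [h']
    · exfalso
      rw [List.getD_eq_default mb [] (by omega)] at hc1 hc2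
      rcases hPt with hb | hb
      · rcases hc1 with h' | h' <;> simp [hb] at h'
      · rcases hc2 with h' | h' <;> simp [hb] at h'
  · intro hall i hi
    rw [PySem.List.mem_pyRange_iff_of_pos (by norm_num)] at hi
    obtain ⟨h0, hlt, m, hm⟩ := hi
    have ht' : i = ((2 * m.toNat : Nat) : Int) := by omega
    subst ht'
    set t := m.toNat with htdef
    have h2t : 2 * t < d.length := by exact_mod_cast hlt
    simp only [slice_two, hslf]
    by_cases hb : blockAt d t = ['0', '1'] ∨ blockAt d t = ['1', '0']
    · have htlen : t < d.length / 2 := blockAt_det_lt hb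
      have hpmem : ((t : Int), blockAt d t) ∈
          ((List.range (d.length / 2)).filter
            (fun t => blockAt d t == ['0', '1'] || blockAt d t == ['1', '0'])).map
          (fun (t : Nat) => ((t : Int), blockAt d t)) := by
        apply List.mem_map.mpr
        refine ⟨t, List.mem_filter.mpr ⟨List.mem_range.mpr htlen, ?_⟩, rfl⟩
        rcases hb with h' | h' <;> simp [h']
      have := hall _ hpmem
      simp only [hget, beq_iff_eq] at this
      have hmt : t < mb.length := by
        by_contra hge
        rw [List.getElem?_eq_none (by omega)] at this
        simp at this
      rw [List.getElem?_eq_getElem hmt] at this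
      have hgd : mb.getD t [] = blockAt d t := by
        rw [List.getD_eq_getElem mb [] hmt]
        exact Option.some.inj this
      rw [hgd]
      rcases hb with h' | h' <;> rw [h'] <;> simp
    · rw [not_or] at hb
      obtain ⟨hb1, hb2⟩ := hb
      simp [hb1, hb2]

lemma constraints_sorted (d : List Char) :
    (constraintsOf d).Pairwise (fun p q => p.1 < q.1) := by
  rw [constraintsOf_eq, List.pairwise_map]
  exact (List.pairwise_lt_range.filter _).imp (fun h => by simpa using h)

lemma constraints_nonneg (d : List Char) : ∀ p ∈ constraintsOf d, 0 ≤ p.1 := by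
  rw [constraintsOf_eq]
  intro p hp
  rcases List.mem_map.mp hp with ⟨t, _, rfl⟩
  simp

lemma okAt_shift (j : Int) (v : List Char) (mb : List (List Char))
    (c : List (Int × List Char)) (h : ∀ p ∈ c, j + 1 ≤ p.1) :
    okAt j (v :: mb) c = okAt (j + 1) mb c := by
  unfold okAt
  rw [Bool.eq_iff_iff, List.all_eq_true, List.all_eq_true]
  have key : ∀ p ∈ c, PySem.List.pyGet? (v :: mb) (p.1 - j) = PySem.List.pyGet? mb (p.1 - (j + 1)) := by
    intro p hp
    have h1 := h p hp
    have hnn : 0 ≤ p.1 - (j + 1) := by omega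
    have hsub : p.1 - j = ((p.1 - (j + 1)).toNat : Int) + 1 := by omega
    rw [hsub, PySem.List.pyGet?_cons_succ, Int.toNat_of_nonneg hnn]
  refine ⟨fun hall p hp => ?_, fun hall p hp => ?_⟩
  · rw [← key p hp]; exact hall p hp
  · rw [key p hp]; exact hall p hp

lemma step_any (j : Int) (v : List Char) (mb : List (List Char))
    (cands : List (List (Int × List Char)))
    (hc : ∀ c ∈ cands, c.Pairwise (fun p q => p.1 < q.1) ∧ ∀ p ∈ c, j ≤ p.1) :
    ((cands.filter (fun c =>
        match c.head? with
        | some iw => !(iw.1 == j) || iw.2 == v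
        | none => true)).map (fun c =>
        match c.head? with
        | some iw => if iw.1 == j then c.tail else c
        | none => c)).any (okAt (j + 1) mb)
      = cands.any (okAt j (v :: mb)) := by
  rw [List.any_map, List.any_filter]
  rw [Bool.eq_iff_iff, List.any_eq_true, List.any_eq_true]
  have key : ∀ c ∈ cands,
      (((fun c =>
        match c.head? with
        | some iw => !(iw.1 == j) || iw.2 == v
        | none => true) c) &&
       ((okAt (j + 1) mb) ∘ (fun c =>
        match c.head? with
        | some iw => if iw.1 == j then c.tail else c
        | none => c)) c) = okAt j (v :: mb) c := by
    intro c hcmem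
    obtain ⟨hpw, hbd⟩ := hc c hcmem
    cases c with
    | nil => simp [okAt]
    | cons p rest =>
      obtain ⟨i, w⟩ := p
      have hi : j ≤ i := hbd (i, w) (by simp)
      have hrest : ∀ q ∈ rest, j + 1 ≤ q.1 := by
        intro q hq
        have hlt := (List.pairwise_cons.mp hpw).1 q hq
        have := hbd q (by simp [hq])
        omega
      by_cases hij : i = j
      · have hji : j = i := hij.symm
        subst hji
        have hrw : okAt j (v :: mb) ((j, w) :: rest) =
            ((PySem.List.pyGet? (v :: mb) (j - j) == some w) && okAt j (v :: mb) rest) := by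
          simp [okAt]
        rw [hrw, sub_self, PySem.List.pyGet?_zero_cons, okAt_shift j v mb rest hrest]
        simp only [List.head?_cons, beq_self_eq_true, Bool.not_true, Bool.false_or, ite_true,
          Function.comp, List.tail_cons]
        have hwv : (w == v) = (some v == some w) := by
          rw [Bool.eq_iff_iff]
          simp only [beq_iff_eq, Option.some.injEq]
          exact eq_comm
        rw [hwv]
      · have hij' : (i == j) = false := by simp [hij]
        simp only [List.head?_cons, hij', Bool.not_false, Bool.true_or, Bool.true_and,
          Function.comp]
        refine (okAt_shift j v mb ((i, w) :: rest) ?_).symm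
        intro q hq
        rcases List.mem_cons.mp hq with rfl | hq'
        · simp only []
          omega
        · exact hrest q hq'
  constructor
  · rintro ⟨c, hcm, hok⟩
    exact ⟨c, hcm, by rw [← key c hcm]; exact hok⟩
  · rintro ⟨c, hcm, hok⟩
    exact ⟨c, hcm, by rw [key c hcm]; exact hok⟩

lemma pyGet?_nil (x : Int) : PySem.List.pyGet? ([] : List (List Char)) x = none := by
  simp [PySem.List.pyGet?, PySem.List.pyIdx?]

lemma okAt_nil_mb {j : Int} {c : List (Int × List Char)} (hne : c ≠ []) : okAt j [] c = false := by
  cases c with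
  | nil => exact absurd rfl hne
  | cons p rest => simp [okAt, pyGet?_nil]

lemma partAt_ne_nil (c : List Char) (t : Nat) : partAt c t ≠ [] := by
  unfold partAt
  split_ifs <;> simp

lemma partsOf_length (c : List Char) : (partsOf c).length = c.length / 2 := by
  simp [partsOf]

lemma step_inv (j K : Int) (v : List Char) (cands : List (List (Int × List Char)))
    (hc : ∀ c ∈ cands, c.Pairwise (fun p q => p.1 < q.1) ∧ ∀ p ∈ c, j ≤ p.1 ∧ p.1 < K) :
    ∀ c' ∈ (cands.filter (fun c =>
        match c.head? with
        | some iw => !(iw.1 == j) || iw.2 == v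
        | none => true)).map (fun c =>
        match c.head? with
        | some iw => if iw.1 == j then c.tail else c
        | none => c),
      c'.Pairwise (fun p q => p.1 < q.1) ∧ ∀ p ∈ c', j + 1 ≤ p.1 ∧ p.1 < K := by
  intro c' hc'
  rcases List.mem_map.mp hc' with ⟨c, hcf, rfl⟩
  rcases List.mem_filter.mp hcf with ⟨hcm, _⟩
  obtain ⟨hpw, hbd⟩ := hc c hcm
  cases c with
  | nil => simp
  | cons p rest =>
    obtain ⟨i, w⟩ := p
    have hi := hbd (i, w) (by simp)
    have hrest : ∀ q ∈ rest, j + 1 ≤ q.1 ∧ q.1 < K := by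
      intro q hq
      have hlt := (List.pairwise_cons.mp hpw).1 q hq
      have := hbd q (by simp [hq])
      exact ⟨by omega, this.2⟩
    by_cases hij : i = j
    · have hji : j = i := hij.symm
      subst hji
      simp only [List.head?_cons, beq_self_eq_true, ite_true, List.tail_cons]
      exact ⟨(List.pairwise_cons.mp hpw).2, hrest⟩
    · have hij' : (i == j) = false := by simp [hij]
      simp only [List.head?_cons, hij', Bool.false_eq_true, ite_false]
      refine ⟨hpw, ?_⟩
      intro q hq
      rcases List.mem_cons.mp hq with rfl | hq'
      · exact ⟨by simp only []; omega, hi.2⟩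
      · exact hrest q hq'

lemma recCov_spec (cube : List Char) :
    ∀ (n : Nat) (cands : List (List (Int × List Char))), n ≤ cube.length / 2 →
      (∀ c ∈ cands, c.Pairwise (fun p q => p.1 < q.1) ∧
        ∀ p ∈ c, ((cube.length / 2 : Nat) : Int) - n ≤ p.1 ∧ p.1 < ((cube.length / 2 : Nat) : Int)) →
      (recCov cube n (((cube.length / 2 : Nat) : Int) - n) cands = true ↔
        ∀ mb ∈ prodAll ((partsOf cube).drop (cube.length / 2 - n)),
          cands.any (okAt (((cube.length / 2 : Nat) : Int) - n) mb) = true) := by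
  intro n
  induction n with
  | zero =>
    intro cands hn hc
    rw [recCov]
    simp only [Nat.cast_zero, sub_zero, Nat.sub_zero]
    rw [List.drop_eq_nil_of_le (by rw [partsOf_length])]
    by_cases hA : cands.any (fun c => c.isEmpty) = true
    · simp only [hA, if_true]
      constructor
      · intro _ mb hmb
        rcases List.any_eq_true.mp hA with ⟨c, hcm, hce⟩
        refine List.any_eq_true.mpr ⟨c, hcm, ?_⟩
        rw [List.isEmpty_iff.mp hce]
        simp [okAt]
      · intro _
        trivial
    · rw [Bool.not_eq_true] at hA
      simp only [hA, Bool.false_eq_true, if_false, ite_self]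
      have hfalse : cands.any (okAt ((cube.length / 2 : Nat) : Int) []) = false := by
        rw [List.any_eq_false]
        intro c hcm
        have hne : c ≠ [] := by
          intro hnil
          have := List.any_eq_false.mp hA c hcm
          rw [hnil] at this
          simp at this
        simp [okAt_nil_mb hne]
      constructor
      · intro hfalse'
        exact absurd hfalse' (by simp)
      · intro hall
        have := hall [] (by simp [prodAll])
        rw [hfalse] at this
        simp at this
  | succ n ih =>
    intro cands hn hc
    have ht : cube.length / 2 - (n + 1) < cube.length / 2 := by omega
    set t := cube.length / 2 - (n + 1) with htdef
    have hj1 : ((cube.length / 2 : Nat) : Int) - ((n + 1 : Nat) : Int) = (t : Int) := by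
      push_cast
      omega
    have hj2 : ((cube.length / 2 : Nat) : Int) - ((n : Nat) : Int) = (t : Int) + 1 := by
      push_cast
      omega
    rw [recCov, hj1]
    by_cases hA : cands.any (fun c => c.isEmpty) = true
    · simp only [hA, if_true]
      constructor
      · intro _ mb hmb
        rcases List.any_eq_true.mp hA with ⟨c, hcm, hce⟩
        refine List.any_eq_true.mpr ⟨c, hcm, ?_⟩
        rw [List.isEmpty_iff.mp hce]
        simp [okAt]
      · intro _
        trivial
    · rw [Bool.not_eq_true] at hA
      simp only [hA, Bool.false_eq_true, if_false]
      by_cases hB : cands.isEmpty = true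
      · simp only [hB, if_true]
        have hne : prodAll ((partsOf cube).drop t) ≠ [] := by
          apply prodAll_ne_nil
          intro p hp
          rcases List.mem_map.mp (List.mem_of_mem_drop hp : p ∈ partsOf cube) with ⟨u, _, rfl⟩
          exact partAt_ne_nil cube u
        rw [List.isEmpty_iff.mp hB]
        constructor
        · intro hfalse'
          exact absurd hfalse' (by simp)
        · intro hall
          rcases List.exists_mem_of_ne_nil _ hne with ⟨mb, hmb⟩
          have := hall mb hmb
          simp at this
      · simp only [hB, Bool.false_eq_true, if_false]
        have hsl : PySem.List.slice cube (some (2 * (t : Int))) (some (2 * (t : Int) + 2)) =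
            blockAt cube t := by
          rw [show (2 * (t : Int)) = ((2 * t : Nat) : Int) from by push_cast; ring]
          exact slice_two cube t
        rw [hsl]
        have hch : (if blockAt cube t == ['0', '1'] || blockAt cube t == ['1', '0']
            then [blockAt cube t] else [['0', '1'], ['1', '0']]) = partAt cube t := by
          unfold partAt
          by_cases h1 : blockAt cube t = ['0', '1']
          · simp [h1]
          · by_cases h2 : blockAt cube t = ['1', '0'] <;> simp [h1, h2]
        rw [hch]
        have hdrop : (partsOf cube).drop t = partAt cube t :: (partsOf cube).drop (t + 1) := by
          rw [List.drop_eq_getElem_cons (by rw [partsOf_length]; omega)]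
          congr 1
          simp [partsOf]
        have ht1 : t + 1 = cube.length / 2 - n := by omega
        have hstepinv : ∀ v, ∀ c' ∈ (cands.filter (fun c =>
              match c.head? with
              | some iw => !(iw.1 == (t : Int)) || iw.2 == v
              | none => true)).map (fun c =>
              match c.head? with
              | some iw => if iw.1 == (t : Int) then c.tail else c
              | none => c),
            c'.Pairwise (fun p q => p.1 < q.1) ∧
              ∀ p ∈ c', ((cube.length / 2 : Nat) : Int) - ((n : Nat) : Int) ≤ p.1 ∧
                p.1 < ((cube.length / 2 : Nat) : Int) := by
          intro v
          have := step_inv (t : Int) ((cube.length / 2 : Nat) : Int) v cands (by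
            intro c hcm
            obtain ⟨h1, h2⟩ := hc c hcm
            refine ⟨h1, fun p hp => ⟨?_, (h2 p hp).2⟩⟩
            have := (h2 p hp).1
            omega)
          intro c' hc'
          obtain ⟨h1, h2⟩ := this c' hc'
          exact ⟨h1, fun p hp => ⟨by rw [hj2]; exact (h2 p hp).1, (h2 p hp).2⟩⟩
        have hlow : ∀ c ∈ cands, c.Pairwise (fun p q => p.1 < q.1) ∧ ∀ p ∈ c, (t : Int) ≤ p.1 := by
          intro c hcm
          obtain ⟨h1, h2⟩ := hc c hcm
          refine ⟨h1, fun p hp => ?_⟩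
          have := (h2 p hp).1
          omega
        rw [List.all_eq_true]
        constructor
        · intro hall mb hmb
          rw [hdrop, mem_prodAll] at hmb
          cases hmb with
          | cons hv hmb' =>
            rename_i x l
            have h1 := hall x hv
            simp only [] at h1
            rw [show (t : Int) + 1 = ((cube.length / 2 : Nat) : Int) - ((n : Nat) : Int) from
              hj2.symm] at h1
            have h2 := (ih _ (by omega) (hstepinv x)).mp h1
            have h3 := h2 l (by
              rw [mem_prodAll, ← ht1]
              exact hmb')
            rw [hj2] at h3
            rw [step_any (t : Int) x l cands hlow] at h3
            exact List.any_eq_true.mpr (by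
              rcases List.any_eq_true.mp h3 with ⟨c, hcm, hok⟩
              exact ⟨c, hcm, hok⟩)
        · intro hall v hv
          rw [show (t : Int) + 1 = ((cube.length / 2 : Nat) : Int) - ((n : Nat) : Int) from
            hj2.symm]
          rw [ih _ (by omega) (hstepinv v)]
          intro mb' hmb'
          rw [hj2, step_any (t : Int) v mb' cands hlow]
          apply hall (v :: mb')
          rw [hdrop, mem_prodAll]
          exact List.Forall₂.cons hv (by
            rw [mem_prodAll, ← ht1] at hmb'
            exact hmb')

lemma mb_blocks {ps : List (List (List Char))} {mb : List (List Char)}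
    (hps : ∀ p ∈ ps, ∀ b ∈ p, b = ['0', '1'] ∨ b = ['1', '0'])
    (h : List.Forall₂ (fun x p => x ∈ p) mb ps) :
    ∀ b ∈ mb, b = ['0', '1'] ∨ b = ['1', '0'] := by
  induction h with
  | nil => simp
  | cons hxp htail ih =>
    intro b hb
    rcases List.mem_cons.mp hb with rfl | hb'
    · exact hps _ (by simp) _ hxp
    · exact ih (fun p hp => hps p (by simp [hp])) b hb'

lemma okAt_zero (mb : List (List Char)) (c : List (Int × List Char)) :
    okAt 0 mb c = c.all (fun p => PySem.List.pyGet? mb p.1 == some p.2) := by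
  simp [okAt]

lemma pyGet?_some_lt {mb : List (List Char)} {x : Int} {w : List Char}
    (h0 : 0 ≤ x) (h : PySem.List.pyGet? mb x = some w) : x < (mb.length : Int) := by
  rw [PySem.List.pyGet?_of_nonneg mb h0] at h
  have := (List.getElem?_eq_some_iff.mp h).1
  omega

lemma prodAll_blocks {cube : List Char} {mb : List (List Char)}
    (hmb : mb ∈ prodAll (partsOf cube)) :
    (∀ b ∈ mb, b.length = 2) ∧ mb.length = cube.length / 2 := by
  have hforall := (mem_prodAll _ _).mp hmb
  have hmem : ∀ b ∈ mb, b = ['0', '1'] ∨ b = ['1', '0'] := by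
    refine mb_blocks ?_ hforall
    intro p hp b hb
    rcases List.mem_map.mp hp with ⟨u, _, rfl⟩
    exact mem_partAt hb
  refine ⟨fun b hb => ?_, by rw [hforall.length_eq, partsOf_length]⟩
  rcases hmem b hb with rfl | rfl <;> rfl

lemma coversAllGo_spec (cube : List Char) : ∀ (ds : List String)
    (acc : List (List (Int × List Char))),
    coversAllGo cube (cube.length / 2) ds acc =
      if ds.any (fun d => (constraintsOf d.toList).isEmpty) then true
      else recCov cube (cube.length / 2) 0 (acc ++ candsOf cube ds) := by
  intro ds
  induction ds with
  | nil =>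
    intro acc
    simp [coversAllGo, candsOf]
  | cons d rest ih =>
    intro acc
    rw [coversAllGo]
    by_cases h1 : (constraintsOf d.toList).isEmpty = true
    · simp [h1]
    · rw [Bool.not_eq_true] at h1
      by_cases hflt : (constraintsOf d.toList).all
          (fun p => decide (p.1 < ((cube.length / 2 : Nat) : Int))) = true
      · have hc : candsOf cube (d :: rest) = constraintsOf d.toList :: candsOf cube rest := by
          unfold candsOf
          simp only [List.map_cons, List.filter_cons, hflt, if_true]
        simp only [h1, Bool.false_eq_true, if_false, hflt, if_true, ih,
          List.any_cons, Bool.false_or, hc]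
        rw [← List.append_cons]
      · have hc : candsOf cube (d :: rest) = candsOf cube rest := by
          unfold candsOf
          simp only [List.map_cons, List.filter_cons, hflt]
          rw [if_neg (by simp)]
        simp only [h1, Bool.false_eq_true, if_false, hflt, ih,
          List.any_cons, Bool.false_or, hc]

lemma coversAll_eq (cube : List Char) (others : List String) :
    coversAll cube others = (getMinterms cube).all (fun m => isCovered m others) := by
  rw [getMinterms_eq, ofList_all, List.all_map]
  unfold coversAll
  rw [coversAllGo_spec, List.nil_append]
  by_cases hE : others.any (fun d => (constraintsOf d.toList).isEmpty) = true
  · simp only [hE, if_true]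
    symm
    rw [List.all_eq_true]
    intro mb hmb
    simp only [Function.comp]
    rcases List.any_eq_true.mp hE with ⟨d, hdm, hde⟩
    unfold isCovered
    rw [List.any_eq_true]
    refine ⟨d, hdm, ?_⟩
    rw [cubeContains_flatten _ _ (prodAll_blocks hmb).1, List.isEmpty_iff.mp hde]
    rfl
  · rw [Bool.not_eq_true] at hE
    simp only [hE, Bool.false_eq_true, if_false]
    have hinv : ∀ c ∈ candsOf cube others, c.Pairwise (fun p q => p.1 < q.1) ∧
        ∀ p ∈ c, ((cube.length / 2 : Nat) : Int) - ((cube.length / 2 : Nat) : Int) ≤ p.1 ∧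
          p.1 < ((cube.length / 2 : Nat) : Int) := by
      intro c hcm
      rcases List.mem_filter.mp hcm with ⟨hcmap, hflt⟩
      rcases List.mem_map.mp hcmap with ⟨d, _, rfl⟩
      refine ⟨constraints_sorted _, fun p hp => ⟨?_, ?_⟩⟩
      · have := constraints_nonneg _ p hp
        omega
      · exact of_decide_eq_true (List.all_eq_true.mp hflt p hp)
    have hspec := recCov_spec cube (cube.length / 2) (candsOf cube others) le_rfl hinv
    rw [sub_self, Nat.sub_self, List.drop_zero] at hspec
    rw [Bool.eq_iff_iff, hspec, List.all_eq_true]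
    simp only [Function.comp]
    have hpt : ∀ mb ∈ prodAll (partsOf cube),
        ((candsOf cube others).any (okAt 0 mb) = isCovered mb.flatten others) := by
      intro mb hmb
      have h2 := (prodAll_blocks hmb).1
      have hlen := (prodAll_blocks hmb).2
      unfold candsOf isCovered
      rw [Bool.eq_iff_iff, List.any_eq_true, List.any_eq_true]
      constructor
      · rintro ⟨c, hcm, hok⟩
        rcases List.mem_filter.mp hcm with ⟨hcmap, hflt⟩
        rcases List.mem_map.mp hcmap with ⟨d, hdm, rfl⟩
        refine ⟨d, hdm, ?_⟩
        rw [cubeContains_flatten _ _ h2]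
        rw [okAt_zero] at hok
        exact hok
      · rintro ⟨d, hdm, hcc⟩
        rw [cubeContains_flatten _ _ h2] at hcc
        have hq : (constraintsOf d.toList).all
            (fun p => decide (p.1 < ((cube.length / 2 : Nat) : Int))) = true := by
          rw [List.all_eq_true]
          intro p hp
          have hok := List.all_eq_true.mp hcc p hp
          have h0 : 0 ≤ p.1 := constraints_nonneg _ p hp
          have hlt := pyGet?_some_lt h0 (eq_of_beq hok)
          simp only [decide_eq_true_eq]
          rw [hlen] at hlt
          exact hlt
        refine ⟨constraintsOf d.toList,
          List.mem_filter.mpr ⟨List.mem_map.mpr ⟨d, hdm, rfl⟩, hq⟩, ?_⟩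
        rw [okAt_zero]
        exact hcc
    constructor
    · intro h mb hmb
      have := h mb hmb
      rw [hpt mb hmb] at this
      exact this
    · intro h mb hmb
      rw [hpt mb hmb]
      exact h mb hmb

-- ===== VERDICT (by name: the statement is the Claim_ definition above) =====
theorem irredundant_spec : Claim_equal_irredundant := by
  intro cover _
  unfold Spec_irredundant irredundant irredundant_alt
  congr 1
  funext finalCover i
  cases hpg : PySem.List.pyGet? finalCover i with
  | none => rfl
  | some cube =>
    simp only []
    by_cases he : (PySem.List.slice finalCover none (some i) ++
        PySem.List.slice finalCover (some (i + 1)) none).isEmpty = true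
    · simp [he]
    · rw [Bool.not_eq_true] at he
      simp [he, coversAll_eq]
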